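-- pv_equiv track=rewrite | github.com/LizzetClifton/SUMMIT_site | main2.py | to_str
-- ===== SOURCE A (Python) =====
-- def to_str(arr):
--   operation = ""
--   for x in arr:
--     if x == 10:
--       operation += (str(chr(45)))
--     elif x == 11:
--       operation += (str(chr(43)))
--     elif x == 12:
--       operation += (str(chr(42)))
--     elif x == 13:
--       operation += (str(chr(47)))
--     else:
--       operation += (str(x))
--
--   return operation
-- ===== SOURCE B (Python) =====
-- def to_str(arr):
--   # Divide-and-conquer: split the list in halves and concatenate; a singleton
--   # is resolved arithmetically by indexing into "-+*/" for codes 10..13.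
--   if not arr:
--     return ""
--   if len(arr) == 1:
--     x = arr[0]
--     return "-+*/"[x - 10] if 10 <= x <= 13 else str(x)
--   mid = len(arr) // 2
--   return to_str(arr[:mid]) + to_str(arr[mid:])
-- ===== Notes on version B (the rewrite author's own statement) =====
-- stated objective: alternative
-- what changed: Replaces the single linear loop with an if/elif cascade by a divide-and-conquer recursion that splits the list in halves and resolves each operator code arithmetically by indexing into the string "-+*/".
import Mathlib
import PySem

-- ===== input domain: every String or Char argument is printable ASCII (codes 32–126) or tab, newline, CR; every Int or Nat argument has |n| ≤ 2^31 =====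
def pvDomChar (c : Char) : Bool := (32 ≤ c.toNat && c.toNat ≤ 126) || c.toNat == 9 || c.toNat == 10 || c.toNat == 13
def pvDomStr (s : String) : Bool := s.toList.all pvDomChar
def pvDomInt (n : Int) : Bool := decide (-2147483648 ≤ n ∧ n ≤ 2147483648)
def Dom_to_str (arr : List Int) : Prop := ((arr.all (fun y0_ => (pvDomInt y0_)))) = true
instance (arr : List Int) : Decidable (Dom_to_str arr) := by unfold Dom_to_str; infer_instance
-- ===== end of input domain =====

-- B replaces A's linear loop + if/elif cascade by a divide-and-conquer halving recursion
-- resolving operator codes by arithmetic indexing into "-+*/" (alternative, same result).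


-- ===== PORT A =====
-- A's per-element branch chain (the body of the if/elif cascade)
def to_str_branch (x : Int) : String :=
  if x = 10 then "-"
  else if x = 11 then "+"
  else if x = 12 then "*"
  else if x = 13 then "/"
  else PySem.Int.toStr x

def to_str (arr : List Int) : String :=
  arr.foldl (fun operation x => operation ++ to_str_branch x) ""

-- ===== PORT B =====
-- "-+*/"[x-10] if 10 <= x <= 13 else str(x); the guard makes the index 0..3, so pyGet? is some
def to_str_elem (x : Int) : String :=
  if 10 ≤ x ∧ x ≤ 13 then
    ((PySem.Str.pyGet? "-+*/" (x - 10)).map Char.toString).getD ""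
  else PySem.Int.toStr x

-- arr[:mid] / arr[mid:] ported as take/drop: exact here since 0 ≤ mid ≤ len arr
def to_str_alt (arr : List Int) : String :=
  if arr.length = 0 then ""
  else if arr.length = 1 then to_str_elem arr.headI
  else
    let mid := arr.length / 2
    to_str_alt (arr.take mid) ++ to_str_alt (arr.drop mid)
termination_by arr.length
decreasing_by
  · simp; omega
  · simp; omega

-- ===== PRECONDITION & SPEC =====
def Spec_to_str (arr : List Int) (out : String) : Prop := out = to_str_alt arr
instance (arr : List Int) (out : String) : Decidable (Spec_to_str arr out) := by unfold Spec_to_str; infer_instance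

-- ===== CLAIM (what is proved, stated in full; the proofs are below) =====
def Claim_equal_to_str : Prop := ∀ (arr : List Int), Dom_to_str arr → Spec_to_str arr (to_str arr)

-- ===== LEMMAS AND PROOFS =====
theorem elem_eq_branch (x : Int) : to_str_elem x = to_str_branch x := by
  unfold to_str_elem to_str_branch
  by_cases h : 10 ≤ x ∧ x ≤ 13
  · have : x = 10 ∨ x = 11 ∨ x = 12 ∨ x = 13 := by omega
    rcases this with rfl | rfl | rfl | rfl <;> decide
  · have h10 : x ≠ 10 := by omega
    have h11 : x ≠ 11 := by omega
    have h12 : x ≠ 12 := by omega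
    have h13 : x ≠ 13 := by omega
    simp [h, h10, h11, h12, h13]

theorem foldl_append_toList (arr : List Int) (acc : String) :
    (arr.foldl (fun operation x => operation ++ to_str_branch x) acc).toList =
      acc.toList ++ (arr.map (fun x => (to_str_branch x).toList)).flatten := by
  induction arr generalizing acc with
  | nil => simp
  | cons a t ih => simp [List.foldl, ih]

theorem alt_toList : ∀ (n : Nat) (arr : List Int), arr.length ≤ n →
    (to_str_alt arr).toList = (arr.map (fun x => (to_str_elem x).toList)).flatten := by
  intro n
  induction n with
  | zero =>
    intro arr h
    have : arr = [] := List.eq_nil_of_length_eq_zero (by omega)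
    subst this; rw [to_str_alt]; simp
  | succ n ih =>
    intro arr h
    rw [to_str_alt]
    by_cases h0 : arr.length = 0
    · have : arr = [] := List.eq_nil_of_length_eq_zero h0
      subst this; simp
    · by_cases h1 : arr.length = 1
      · match arr, h1 with
        | [x], _ => simp [List.headI]
      · simp only [h0, h1, if_false]
        have hmid1 : 1 ≤ arr.length / 2 := by omega
        have hmid2 : arr.length / 2 < arr.length := by omega
        rw [String.toList_append,
          ih (arr.take (arr.length / 2)) (by simp; omega),
          ih (arr.drop (arr.length / 2)) (by simp; omega)]
        rw [List.map_take, List.map_drop, ← List.flatten_append,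
          List.take_append_drop]

-- ===== VERDICT (by name: the statement is the Claim_ definition above) =====
theorem to_str_spec : Claim_equal_to_str := by
  intro arr _
  unfold Spec_to_str to_str
  apply String.toList_inj.mp
  rw [foldl_append_toList, alt_toList arr.length arr le_rfl]
  simp [elem_eq_branch]
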